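-- pv_equiv track=rewrite | github.com/zz6zz666/astrbot_plugin_memos_integrator | web_ui/config_manager.py | _validate_user_id
-- ===== SOURCE A (Python) =====
-- def _validate_user_id(user_id: str) -> bool:
--     """
--     验证用户ID格式
--
--     Args:
--         user_id: 用户ID字符串
--
--     Returns:
--         是否有效
--     """
--     if not user_id:
--         return True
--
--     # 检查长度
--     if len(user_id) > 100:
--         return False
--
--     # 检查是否有危险字符（防止注入攻击）
--     dangerous_chars = ['<', '>', '"', "'", '\\', '/', ';', '&', '|', '$', '`']
--     for char in dangerous_chars:
--         if char in user_id:
--             return False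
--
--     return True
-- ===== SOURCE B (Python) =====
-- def _validate_user_id(user_id: str) -> bool:
--     if not user_id:
--         return True
--     if len(user_id) > 100:
--         return False
--     return all(c not in '<>"\'\\/;&|$`' for c in user_id)
-- ===== Notes on version B (the rewrite author's own statement) =====
-- stated objective: idiomatic
-- what changed: A scans user_id once per dangerous character (11 substring searches); B makes a single pass over user_id testing each character against the dangerous set with all().
import Mathlib
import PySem

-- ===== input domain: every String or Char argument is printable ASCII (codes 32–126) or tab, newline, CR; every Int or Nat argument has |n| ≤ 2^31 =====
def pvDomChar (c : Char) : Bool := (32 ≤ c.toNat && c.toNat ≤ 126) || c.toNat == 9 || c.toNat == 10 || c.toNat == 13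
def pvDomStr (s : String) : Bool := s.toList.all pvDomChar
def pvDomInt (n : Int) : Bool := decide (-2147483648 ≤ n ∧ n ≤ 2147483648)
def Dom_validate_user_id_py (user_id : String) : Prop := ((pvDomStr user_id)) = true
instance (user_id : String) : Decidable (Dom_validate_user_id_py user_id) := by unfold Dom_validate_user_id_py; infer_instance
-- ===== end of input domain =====

-- B replaces A's per-dangerous-character substring scans with a single all() pass over user_id (idiomatic).


-- ===== PORT A =====
def pvDangerousA : List Char := ['<', '>', '"', '\'', '\\', '/', ';', '&', '|', '$', '`']

-- for-loop over dangerous_chars with early return ⇒ List.any over the same list, in order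
def validate_user_id_py (user_id : String) : Bool :=
  if user_id.toList.isEmpty then true
  else if user_id.toList.length > 100 then false
  else if pvDangerousA.any (fun ch => user_id.toList.contains ch) then false
  else true

-- ===== PORT B =====
def pvDangerousB : List Char := "<>\"'\\/;&|$`".toList

def validate_user_id_py_alt (user_id : String) : Bool :=
  if user_id.toList.isEmpty then true
  else if user_id.toList.length > 100 then false
  else user_id.toList.all (fun c => !(pvDangerousB.contains c))

-- ===== PRECONDITION & SPEC =====
def Spec_validate_user_id_py (user_id : String) (out : Bool) : Prop := out = validate_user_id_py_alt user_id
instance (user_id : String) (out : Bool) : Decidable (Spec_validate_user_id_py user_id out) := by unfold Spec_validate_user_id_py; infer_instance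

-- ===== CLAIM (what is proved, stated in full; the proofs are below) =====
def Claim_equal_validate_user_id_py : Prop := ∀ (user_id : String), Dom_validate_user_id_py user_id → Spec_validate_user_id_py user_id (validate_user_id_py user_id)

-- ===== LEMMAS AND PROOFS =====

-- the two membership scans see the same characters as dangerous
theorem pvDangerous_eq : pvDangerousB = pvDangerousA := by decide

-- swap the order of the two existential scans: some dangerous char occurs in s ↔ some char of s is dangerous
theorem any_swap (l : List Char) :
    pvDangerousA.any (fun ch => l.contains ch) = !(l.all (fun c => !(pvDangerousA.contains c))) := by
  rw [Bool.eq_iff_iff]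
  simp [List.any_eq_true, List.contains_eq_mem]
  tauto

-- ===== VERDICT (by name: the statement is the Claim_ definition above) =====
theorem validate_user_id_py_spec : Claim_equal_validate_user_id_py := by
  intro s _
  unfold Spec_validate_user_id_py validate_user_id_py validate_user_id_py_alt
  rw [pvDangerous_eq, any_swap]
  cases h : (s.toList.all (fun c => !(pvDangerousA.contains c))) <;> simp
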